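-- pv_equiv track=rewrite | github.com/sangka9/codingPractice | programmers/n^2_SquaredArray.py | solution
-- ===== SOURCE A (Python) =====
-- def solution(n, left, right):
--     answer = []
--     index = 0
--
--     for i in range(n) :
--
--         #left 건너뛰기
--         if(index < left - n) :
--             index += n
--             continue
--
--         tmp = [k for k in range(i,0,-1)]
--         for j in range(n) :
--             if(j < i) and left <= index < right+1:
--                 answer.append(j+1+tmp[j])
--             elif left <= index < right+1 :
--                 answer.append(j+1)
--             elif index >= right + 1 : # right 건너뛰기
--                 break
--             index += 1
--         if index >= right + 1 :  # right index 초과시 종료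
--             break
--
--     return answer
-- ===== SOURCE B (Python) =====
-- def solution(n, left, right):
--     lo = max(left, 0)
--     hi = min(right + 1, max(n, 0) ** 2)
--     return [max(k // n, k % n) + 1 for k in range(lo, hi)]
-- ===== Notes on version B (the rewrite author's own statement) =====
-- stated objective: faster
-- what changed: Replaces the nested row/column scan over the whole n x n grid (with a per-row temp list and break/continue index bookkeeping) by a direct closed form: entry k of the flattened grid is max(k//n, k%n)+1, computed only for k in the requested slice clamped to the grid's valid indices.
import Mathlib
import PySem

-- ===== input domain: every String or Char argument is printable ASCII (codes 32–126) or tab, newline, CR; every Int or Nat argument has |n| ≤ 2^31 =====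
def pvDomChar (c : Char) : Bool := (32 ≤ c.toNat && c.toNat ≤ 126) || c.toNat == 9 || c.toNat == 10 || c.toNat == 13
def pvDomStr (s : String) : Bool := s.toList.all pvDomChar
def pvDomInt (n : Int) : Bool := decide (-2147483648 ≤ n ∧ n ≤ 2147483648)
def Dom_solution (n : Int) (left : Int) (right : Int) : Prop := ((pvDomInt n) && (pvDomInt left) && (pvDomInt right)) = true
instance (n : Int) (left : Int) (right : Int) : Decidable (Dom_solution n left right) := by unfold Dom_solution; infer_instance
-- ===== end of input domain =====

-- B replaces A's nested scan over the whole n×n grid by the closed form max(k//n, k%n)+1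
-- evaluated only on the requested slice clamped to the grid's indices (objective: faster).

-- ===== PORT A =====
-- inner 'for j in range(n)' loop: state (answer, index); early return models 'break'
def innerA (i left right : Int) (tmp : List Int) (js : List Int)
    (ans : List Int) (idx : Int) : List Int × Int :=
  match js with
  | [] => (ans, idx)
  | j :: rest =>
    if j < i ∧ left ≤ idx ∧ idx < right + 1 then
      innerA i left right tmp rest (ans ++ [j + 1 + PySem.List.pyGetD tmp j 0]) (idx + 1)
    else if left ≤ idx ∧ idx < right + 1 then
      innerA i left right tmp rest (ans ++ [j + 1]) (idx + 1)
    else if idx ≥ right + 1 then (ans, idx)   -- break (skips 'index += 1')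
    else innerA i left right tmp rest ans (idx + 1)

-- outer 'for i in range(n)' loop: 'continue' adds n to index, 'break' returns answer
def outerA (n left right : Int) (is_ : List Int) (ans : List Int) (idx : Int) : List Int :=
  match is_ with
  | [] => ans
  | i :: rest =>
    if idx < left - n then outerA n left right rest ans (idx + n)
    else
      let tmp := PySem.List.pyRange i 0 (-1)
      let p := innerA i left right tmp (PySem.List.pyRange 0 n 1) ans idx
      if p.2 ≥ right + 1 then p.1
      else outerA n left right rest p.1 p.2

def solution (n : Int) (left : Int) (right : Int) : List Int :=
  outerA n left right (PySem.List.pyRange 0 n 1) [] 0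

-- ===== PORT B =====
def solution_alt (n : Int) (left : Int) (right : Int) : List Int :=
  let lo := max left 0
  let hi := min (right + 1) (max n 0 ^ 2)
  (PySem.List.pyRange lo hi 1).map
    (fun k => max (PySem.Int.floordiv k n) (PySem.Int.mod k n) + 1)

-- ===== PRECONDITION & SPEC =====
def Spec_solution (n : Int) (left : Int) (right : Int) (out : List Int) : Prop := out = solution_alt n left right
instance (n : Int) (left : Int) (right : Int) (out : List Int) : Decidable (Spec_solution n left right out) := by unfold Spec_solution; infer_instance

-- ===== CLAIM (what is proved, stated in full; the proofs are below) =====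
def Claim_equal_solution : Prop := ∀ (n : Int) (left : Int) (right : Int), Dom_solution n left right → Spec_solution n left right (solution n left right)

-- ===== LEMMAS AND PROOFS =====

-- the closed-form value of flattened-grid entry k
def fval (n k : Int) : Int := max (PySem.Int.floordiv k n) (PySem.Int.mod k n) + 1

lemma floordiv_row (n i j : Int) (hn : 0 < n) (hj0 : 0 ≤ j) (hjn : j < n) :
    PySem.Int.floordiv (i * n + j) n = i := by
  rw [PySem.Int.floordiv_eq_iff_of_pos hn]
  constructor <;> nlinarith

lemma mod_row (n i j : Int) (hn : 0 < n) (hj0 : 0 ≤ j) (hjn : j < n) :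
    PySem.Int.mod (i * n + j) n = j := by
  have h := PySem.Int.floordiv_mul_add_mod (i * n + j) n
  rw [floordiv_row n i j hn hj0 hjn] at h
  linarith

lemma fval_row (n i j : Int) (hn : 0 < n) (hj0 : 0 ≤ j) (hjn : j < n) :
    fval n (i * n + j) = max i j + 1 := by
  rw [fval, floordiv_row n i j hn hj0 hjn, mod_row n i j hn hj0 hjn]

lemma tmp_get (i j : Int) (hj0 : 0 ≤ j) (hji : j < i) :
    PySem.List.pyGetD (PySem.List.pyRange i 0 (-1)) j 0 = i - j := by
  obtain ⟨m, rfl⟩ : ∃ m : Nat, j = (m : Int) := ⟨j.toNat, by omega⟩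
  rw [PySem.List.pyRange_neg_one, PySem.List.pyGetD_natCast]
  simp only [Int.sub_zero]
  have hm : m < i.toNat := by omega
  rw [List.getD_eq_getElem?_getD, List.getElem?_map, List.getElem?_range hm]
  simp

lemma innerA_spec (n i left right : Int) (hn : 0 < n)
    (j : Int) (hj0 : 0 ≤ j) (hjn : j ≤ n) (ans : List Int) :
    innerA i left right (PySem.List.pyRange i 0 (-1)) (PySem.List.pyRange j n 1) ans (i * n + j)
    = (ans ++ (PySem.List.pyRange (max left (i * n + j)) (min (right + 1) ((i + 1) * n)) 1).map (fval n),
       min ((i + 1) * n) (max (i * n + j) (right + 1))) := by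
  obtain ⟨k, hk⟩ : ∃ k : Nat, n - j = (k : Int) := ⟨(n - j).toNat, by omega⟩
  induction k generalizing j ans with
  | zero =>
    have hjn' : j = n := by omega
    rw [hjn', PySem.List.pyRange_one_eq_nil le_rfl, innerA]
    have h1 : (i + 1) * n = i * n + n := by ring
    have h2 : min (right + 1) ((i + 1) * n) ≤ max left (i * n + n) := by
      rw [h1]; have := le_max_right left (i * n + n); omega
    rw [PySem.List.pyRange_one_eq_nil h2]
    simp only [List.map_nil, List.append_nil, Prod.mk.injEq, true_and]
    have := le_max_left (i * n + n) (right + 1)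
    omega
  | succ k ih =>
    have hjlt : j < n := by omega
    rw [PySem.List.pyRange_one_cons hjlt, innerA]
    have hidx_lt : i * n + j < (i + 1) * n := by nlinarith
    by_cases hwin : left ≤ i * n + j ∧ i * n + j < right + 1
    · -- appending branch (either j < i or j ≥ i, same value max i j + 1)
      have hlo : max left (i * n + j) = i * n + j := by omega
      have hlo1 : max left (i * n + j + 1) = i * n + j + 1 := by omega
      have hcons : PySem.List.pyRange (i * n + j) (min (right + 1) ((i + 1) * n)) 1
          = (i * n + j) :: PySem.List.pyRange (i * n + j + 1) (min (right + 1) ((i + 1) * n)) 1 :=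
        PySem.List.pyRange_one_cons (by omega)
      have hrec := ih (j + 1) (by omega) (by omega)
      have harith : i * n + (j + 1) = i * n + j + 1 := by ring
      rw [harith] at hrec
      have hmax : max (i * n + j + 1) (right + 1) = max (i * n + j) (right + 1) := by omega
      by_cases hji : j < i
      · rw [if_pos ⟨hji, hwin⟩]
        rw [tmp_get i j hj0 hji]
        have hval : j + 1 + (i - j) = fval n (i * n + j) := by
          rw [fval_row n i j hn hj0 hjlt]; omega
        have hlist : ans ++ [j + 1 + (i - j)] = ans ++ [fval n (i * n + j)] := by rw [hval]
        rw [hlist, hrec (ans ++ [fval n (i * n + j)]) (by omega)]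
        rw [hlo, hlo1, hcons, hmax]
        simp
      · rw [if_neg (by tauto), if_pos hwin]
        have hval : j + 1 = fval n (i * n + j) := by
          rw [fval_row n i j hn hj0 hjlt]; omega
        have hlist : ans ++ [j + 1] = ans ++ [fval n (i * n + j)] := by rw [hval]
        rw [hlist, hrec (ans ++ [fval n (i * n + j)]) (by omega)]
        rw [hlo, hlo1, hcons, hmax]
        simp
    · rw [if_neg (by tauto), if_neg hwin]
      by_cases hbr : i * n + j ≥ right + 1
      · -- break
        rw [if_pos hbr]
        have hempty : min (right + 1) ((i + 1) * n) ≤ max left (i * n + j) := by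
          have := le_max_right left (i * n + j); omega
        rw [PySem.List.pyRange_one_eq_nil hempty]
        simp only [List.map_nil, List.append_nil, Prod.mk.injEq, true_and]
        omega
      · -- index below the window: move on without appending
        rw [if_neg hbr]
        have hrec := ih (j + 1) (by omega) (by omega)
        have harith : i * n + (j + 1) = i * n + j + 1 := by ring
        rw [harith] at hrec
        rw [hrec ans (by omega)]
        have hl : left > i * n + j := by omega
        have hlo : max left (i * n + j) = left := by omega
        have hlo1 : max left (i * n + j + 1) = left := by omega
        have hmax : max (i * n + j + 1) (right + 1) = max (i * n + j) (right + 1) := by omega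
        rw [hlo, hlo1, hmax]

lemma outerA_spec (n left right : Int) (hn : 0 < n)
    (i : Int) (hi0 : 0 ≤ i) (hin : i ≤ n) (ans : List Int) :
    outerA n left right (PySem.List.pyRange i n 1) ans (i * n)
    = ans ++ (PySem.List.pyRange (max left (i * n)) (min (right + 1) (n * n)) 1).map (fval n) := by
  obtain ⟨k, hk⟩ : ∃ k : Nat, n - i = (k : Int) := ⟨(n - i).toNat, by omega⟩
  induction k generalizing i ans with
  | zero =>
    have hieq : i = n := by omega
    rw [hieq, PySem.List.pyRange_one_eq_nil le_rfl, outerA]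
    have hempty : min (right + 1) (n * n) ≤ max left (n * n) := by
      have := le_max_right left (n * n); omega
    rw [PySem.List.pyRange_one_eq_nil hempty]
    simp
  | succ k ih =>
    have hilt : i < n := by omega
    have hstep : (i + 1) * n = i * n + n := by ring
    have hup : (i + 1) * n ≤ n * n := by nlinarith
    rw [PySem.List.pyRange_one_cons hilt, outerA]
    by_cases hskip : i * n < left - n
    · rw [if_pos hskip]
      have hrec := ih (i + 1) (by omega) (by omega)
      rw [hstep] at hrec
      rw [hrec ans (by omega)]
      have h1 : max left (i * n) = left := by omega
      have h2 : max left (i * n + n) = left := by omega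
      rw [h1, h2]
    · rw [if_neg hskip]
      have hinner := innerA_spec n i left right hn 0 le_rfl (by omega) ans
      rw [add_zero] at hinner
      simp only [hinner]
      by_cases hbr : min ((i + 1) * n) (max (i * n) (right + 1)) ≥ right + 1
      · rw [if_pos hbr]
        have hr1 : right + 1 ≤ (i + 1) * n := by
          have := le_max_left (i * n) (right + 1); omega
        have hmin1 : min (right + 1) ((i + 1) * n) = right + 1 := by omega
        have hmin2 : min (right + 1) (n * n) = right + 1 := by omega
        rw [hmin1, hmin2]
      · rw [if_neg hbr]
        have hr1 : (i + 1) * n < right + 1 := by omega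
        have hidx : min ((i + 1) * n) (max (i * n) (right + 1)) = (i + 1) * n := by omega
        rw [hidx]
        have hrec := ih (i + 1) (by omega) (by omega)
        rw [hstep] at hrec
        rw [hstep]
        rw [hrec _ (by omega)]
        have hmin1 : min (right + 1) (i * n + n) = i * n + n := by omega
        rw [hmin1, List.append_assoc, ← List.map_append]
        by_cases hl : left ≤ i * n + n
      -- join the row's segment with the remaining rows' segment
        · have h1 : max left (i * n + n) = i * n + n := by omega
          rw [h1, ← PySem.List.pyRange_one_append (max left (i * n)) (i * n + n)
                (min (right + 1) (n * n)) (by omega) (by omega)]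
        · have h1 : max left (i * n) = left := by omega
          have h2 : max left (i * n + n) = left := by omega
          rw [h1, h2, PySem.List.pyRange_one_eq_nil (by omega : i * n + n ≤ left),
            List.nil_append]

theorem solution_spec : Claim_equal_solution := by
  intro n left right _
  show solution n left right = solution_alt n left right
  have halt : solution_alt n left right
      = (PySem.List.pyRange (max left 0) (min (right + 1) (max n 0 ^ 2)) 1).map (fval n) := rfl
  rw [halt]
  by_cases hn : 0 < n
  · have h := outerA_spec n left right hn 0 le_rfl (le_of_lt hn) []
    simp only [zero_mul] at h
    have hsol : solution n left right
        = outerA n left right (PySem.List.pyRange 0 n 1) [] 0 := rfl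
    rw [hsol, h, List.nil_append]
    have hsq : max n 0 ^ 2 = n * n := by rw [show max n 0 = n by omega]; ring
    rw [hsq]
  · have hsol : solution n left right
        = outerA n left right (PySem.List.pyRange 0 n 1) [] 0 := rfl
    rw [hsol, PySem.List.pyRange_one_eq_nil (by omega : n ≤ 0)]
    have hsq : max n 0 ^ 2 = 0 := by rw [show max n 0 = 0 by omega]; ring
    have hempty : min (right + 1) (max n 0 ^ 2) ≤ max left 0 := by
      rw [hsq]; exact le_trans (min_le_right _ _) (le_max_right _ _)
    rw [PySem.List.pyRange_one_eq_nil hempty]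
    simp [outerA]
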